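-- pv_equiv track=rewrite | github.com/A-Y-U-S-H-Y-A/fake_website_checker | char_convert.py | generate_permutations_lazy
-- ===== SOURCE A (Python) =====
-- from itertools import product
--
-- def generate_permutations_lazy(url, char_dict):
--     # Create a list of lists where each list contains the ord values of the char and its alternatives
--     substitution_lists = []
--     for char in url:
--         char_ord = ord(char)
--         # Include the character itself and its alternatives if present in the dictionary
--         substitutions = [char_ord] + char_dict.get(char_ord, [])
--         substitution_lists.append(substitutions)
--
--     # Generate all combinations of the substitutions lazily
--     for combination in product(*substitution_lists):
--         yield ''.join(chr(c) for c in combination)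
-- ===== SOURCE B (Python) =====
-- def generate_permutations_lazy(url, char_dict):
--     # Same per-position option lists, then a recursive generator by index
--     # (first position outermost, last fastest -- itertools.product order).
--     options = [[ord(ch)] + char_dict.get(ord(ch), []) for ch in url]
--
--     def rec(i):
--         if i == len(options):
--             yield ''
--         else:
--             for c in options[i]:
--                 for suffix in rec(i + 1):
--                     yield chr(c) + suffix
--
--     yield from rec(0)
-- ===== Notes on version B (the rewrite author's own statement) =====
-- stated objective: alternative
-- what changed: B replaces the accumulate-lists-then-itertools.product pipeline by a recursive generator over positions that prepends chr(c) to each recursively generated suffix (ported as foldl product-loop vs structural recursion).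
-- outside the precondition, e.g. on generate_permutations_lazy('a', {97: [-1]}): A raises ValueError, B raises ValueError
import Mathlib
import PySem

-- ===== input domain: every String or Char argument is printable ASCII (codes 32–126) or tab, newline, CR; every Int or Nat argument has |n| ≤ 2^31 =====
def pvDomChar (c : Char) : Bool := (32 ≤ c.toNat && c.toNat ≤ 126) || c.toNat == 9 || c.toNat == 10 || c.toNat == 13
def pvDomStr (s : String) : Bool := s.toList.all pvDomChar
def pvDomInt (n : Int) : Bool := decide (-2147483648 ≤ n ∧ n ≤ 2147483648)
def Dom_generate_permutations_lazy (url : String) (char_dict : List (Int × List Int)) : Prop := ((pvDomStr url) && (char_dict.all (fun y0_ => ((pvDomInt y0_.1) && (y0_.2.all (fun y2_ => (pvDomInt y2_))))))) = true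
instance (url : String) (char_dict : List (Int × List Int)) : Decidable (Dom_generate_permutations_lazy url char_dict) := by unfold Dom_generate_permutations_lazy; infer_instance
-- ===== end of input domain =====

-- B replaces itertools.product over accumulated substitution lists by a recursive
-- generator over the positions (alternative decomposition; no speed claim).
-- Equivalence is about the fully-consumed generator output (both are generators).

-- ===== PORT A =====
-- itertools.product(*lists) ported as its documented list equivalent:
-- result = [[]]; for pool in pools: result = [x+[y] for x in result for y in pool]
def generate_permutations_lazy (url : String) (char_dict : List (Int × List Int)) : List String :=
  let substitution_lists : List (List Int) :=
    url.toList.map (fun ch => ((ch.toNat : Int)) :: PySem.Dict.getD (PySem.Dict.ofList char_dict) (ch.toNat : Int) [])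
  let combos : List (List Int) :=
    substitution_lists.foldl
      (fun acc pool => acc.flatMap (fun comb => pool.map (fun c => comb ++ [c]))) [[]]
  -- ''.join(chr(c) for c in combination); chr is exact here by Pre_ (valid non-surrogate codes)
  combos.map (fun comb => String.ofList (comb.map (fun c => Char.ofNat c.toNat)))

-- ===== PORT B =====
-- rec(i): yields all suffixes from position i; here structural recursion on the option lists,
-- building each string as chr(c) :: suffix (char lists, String.ofList at the top).
def pvRecB : List (List Int) → List (List Char)
  | [] => [[]]
  | pool :: rest => pool.flatMap (fun c => (pvRecB rest).map (fun s => Char.ofNat c.toNat :: s))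

def generate_permutations_lazy_alt (url : String) (char_dict : List (Int × List Int)) : List String :=
  let options : List (List Int) :=
    url.toList.map (fun ch => ((ch.toNat : Int)) :: PySem.Dict.getD (PySem.Dict.ofList char_dict) (ch.toNat : Int) [])
  (pvRecB options).map String.ofList

-- ===== PRECONDITION & SPEC =====
-- Pre_ excludes inputs on which an alternative code actually used for a character of the url is
-- outside chr's range (Python raises ValueError) or a surrogate code 0xD800–0xDFFF, on which
-- Python returns a lone-surrogate string that Lean's Char/String cannot represent.
def Pre_generate_permutations_lazy (url : String) (char_dict : List (Int × List Int)) : Prop :=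
  (url.toList.all (fun ch =>
    (PySem.Dict.getD (PySem.Dict.ofList char_dict) (ch.toNat : Int) []).all
      (fun c => decide (0 ≤ c) &&
        (decide (c < 0xD800) || (decide (0xE000 ≤ c) && decide (c < 0x110000)))))) = true
instance (url : String) (char_dict : List (Int × List Int)) : Decidable (Pre_generate_permutations_lazy url char_dict) := by unfold Pre_generate_permutations_lazy; infer_instance
def pvWitness_generate_permutations_lazy : String × (List (Int × List Int)) :=
  ("ab", [((97 : Int), [(64 : Int), (65 : Int)])])

def Spec_generate_permutations_lazy (url : String) (char_dict : List (Int × List Int)) (out : List String) : Prop := out = generate_permutations_lazy_alt url char_dict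
instance (url : String) (char_dict : List (Int × List Int)) (out : List String) : Decidable (Spec_generate_permutations_lazy url char_dict out) := by unfold Spec_generate_permutations_lazy; infer_instance

-- ===== CLAIM (what is proved, stated in full; the proofs are below) =====
def Claim_equal_generate_permutations_lazy : Prop := ∀ (url : String) (char_dict : List (Int × List Int)), Dom_generate_permutations_lazy url char_dict → Pre_generate_permutations_lazy url char_dict → Spec_generate_permutations_lazy url char_dict (generate_permutations_lazy url char_dict)

-- ===== LEMMAS AND PROOFS =====

-- foldr-style cartesian product of Int code lists (proof helper)
def pvProdR : List (List Int) → List (List Int)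
  | [] => [[]]
  | pool :: rest => pool.flatMap (fun c => (pvProdR rest).map (fun t => c :: t))

-- the foldl product loop equals the foldr product, up to the accumulated prefixes
theorem pv_foldl_prod (pools : List (List Int)) :
    ∀ acc : List (List Int),
      pools.foldl (fun acc pool => acc.flatMap (fun comb => pool.map (fun c => comb ++ [c]))) acc
        = acc.flatMap (fun pre => (pvProdR pools).map (fun t => pre ++ t)) := by
  induction pools with
  | nil => intro acc; simp [pvProdR]
  | cons pool rest ih =>
    intro acc
    simp only [List.foldl_cons, ih, pvProdR]
    simp [List.flatMap_assoc, List.map_flatMap, List.flatMap_map, Function.comp_def, List.append_assoc]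

-- B's recursion is the foldr product with each code turned into its character
theorem pv_recB_eq (pools : List (List Int)) :
    pvRecB pools = (pvProdR pools).map (fun t => t.map (fun c => Char.ofNat c.toNat)) := by
  induction pools with
  | nil => simp [pvRecB, pvProdR]
  | cons pool rest ih =>
    simp [pvRecB, pvProdR, ih, List.map_flatMap, Function.comp_def]

-- ===== VERDICT (by name: the statement is the Claim_ definition above) =====
theorem generate_permutations_lazy_spec : Claim_equal_generate_permutations_lazy := by
  intro url char_dict _ _
  unfold Spec_generate_permutations_lazy generate_permutations_lazy generate_permutations_lazy_alt
  simp only [pv_foldl_prod, pv_recB_eq]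
  simp [List.map_map, Function.comp_def]
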